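-- pv_equiv track=rewrite | github.com/Babuuum/test | scr.py | spot_search
-- ===== SOURCE A (Python) =====
-- directories = {
--         '1': ['2207 876234', '11-2'],
--         '2': ['10006'],
--         '3': []
--       }
--
-- def spot_search(doc_number):
--     spot_number = ""
--     for search in directories:
--         if doc_number in directories[search]:
--             spot_number = search
--     if spot_number == "":
--         return f"документа под номером {doc_number} в базе нет"
--     else:
--         return spot_number
-- ===== SOURCE B (Python) =====
-- directories = {
--         '1': ['2207 876234', '11-2'],
--         '2': ['10006'],
--         '3': []
--       }
--
-- # flat lookup table: document -> directory key (later keys overwrite earlier ones)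
-- _table = {doc: key for key, docs in directories.items() for doc in docs}
--
-- def spot_search(doc_number):
--     key = _table.get(doc_number)
--     if key is None:
--         return f"документа под номером {doc_number} в базе нет"
--     return key
-- ===== Notes on version B (the rewrite author's own statement) =====
-- stated objective: simpler
-- what changed: Replaces the per-key scan with membership tests and a sentinel string by a flat document-to-key lookup dict built once (later keys overwrite earlier, preserving last-match-wins); the query is a single dict.get.
import Mathlib
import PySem

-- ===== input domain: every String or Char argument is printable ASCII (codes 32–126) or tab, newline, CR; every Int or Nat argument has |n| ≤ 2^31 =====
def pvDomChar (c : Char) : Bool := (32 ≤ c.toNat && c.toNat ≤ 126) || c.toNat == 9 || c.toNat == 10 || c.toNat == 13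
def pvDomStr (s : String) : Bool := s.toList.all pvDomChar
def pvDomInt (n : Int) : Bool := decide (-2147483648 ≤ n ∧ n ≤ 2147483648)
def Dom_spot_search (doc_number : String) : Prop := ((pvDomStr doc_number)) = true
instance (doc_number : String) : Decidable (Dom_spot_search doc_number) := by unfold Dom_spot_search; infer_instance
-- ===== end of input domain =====

-- B replaces A's scan over all directory keys (with a sentinel string) by a flat
-- document→key lookup table built once; objective: simpler.

-- ===== PORT A =====
-- the module-level dict 'directories' (insertion order)
def directoriesA : List (String × List String) :=
  [("1", ["2207 876234", "11-2"]), ("2", ["10006"]), ("3", [])]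

def spot_search (doc_number : String) : String :=
  let spot_number :=
    directoriesA.foldl (fun acc kv => if kv.2.contains doc_number then kv.1 else acc) ""
  if spot_number == "" then "документа под номером " ++ doc_number ++ " в базе нет"
  else spot_number

-- ===== PORT B =====
-- _table = {doc: key for key, docs in directories.items() for doc in docs}
def tableB : PySem.Dict String String :=
  directoriesA.foldl (fun t kv => kv.2.foldl (fun t d => t.insert d kv.1) t) (PySem.Dict.empty)

def spot_search_alt (doc_number : String) : String :=
  match tableB.get? doc_number with
  | none => "документа под номером " ++ doc_number ++ " в базе нет"
  | some key => key

-- ===== PRECONDITION & SPEC =====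
def Spec_spot_search (doc_number : String) (out : String) : Prop := out = spot_search_alt doc_number
instance (doc_number : String) (out : String) : Decidable (Spec_spot_search doc_number out) := by unfold Spec_spot_search; infer_instance

-- ===== CLAIM (what is proved, stated in full; the proofs are below) =====
def Claim_equal_spot_search : Prop := ∀ (doc_number : String), Dom_spot_search doc_number → Spec_spot_search doc_number (spot_search doc_number)

-- ===== LEMMAS AND PROOFS =====
theorem spot_eq (d : String) : spot_search d = spot_search_alt d := by
  by_cases h1 : d = "2207 876234"
  · subst h1; decide
  by_cases h2 : d = "11-2"
  · subst h2; decide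
  by_cases h3 : d = "10006"
  · subst h3; decide
  -- d matches no document: A's fold keeps "", B's lookup misses
  have c1 : (d == "2207 876234") = false := by simp [h1]
  have c2 : (d == "11-2") = false := by simp [h2]
  have c3 : (d == "10006") = false := by simp [h3]
  have e1 : ("2207 876234" == d) = false := by simp [Ne.symm h1]
  have e2 : ("11-2" == d) = false := by simp [Ne.symm h2]
  have e3 : ("10006" == d) = false := by simp [Ne.symm h3]
  have ht : tableB.items = [("2207 876234", "1"), ("11-2", "1"), ("10006", "2")] := by decide
  unfold spot_search spot_search_alt directoriesA
  simp [PySem.Dict.get?, ht, List.find?, List.foldl, List.contains, List.elem,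
        c1, c2, c3, e1, e2, e3]

-- ===== VERDICT (by name: the statement is the Claim_ definition above) =====
theorem spot_search_spec : Claim_equal_spot_search := by
  intro d _; exact spot_eq d
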